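-- pv_equiv track=rewrite | github.com/x4dr/GamePack | gamepack/ItemBase.py | value_category
-- ===== SOURCE A (Python) =====
-- WEIGHTS = {"g": 1, "kg": 10**3, "t": 10**6}
--
-- CURRENCIES = {"k": 1, "s": 10**2, "a": 10**4}
--
-- def value_category(inp: str) -> str:
--     """Gets the type of unit used: weight or money."""
--     for end in WEIGHTS.keys():
--         if inp.endswith(end):
--             return "weight"
--     for end in CURRENCIES.keys():
--         if inp.endswith(end):
--             return "money"
--     return ""
-- ===== SOURCE B (Python) =====
-- WEIGHTS = {"g": 1, "kg": 10**3, "t": 10**6}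
--
-- CURRENCIES = {"k": 1, "s": 10**2, "a": 10**4}
--
-- WEIGHT_CHARS = {"g", "t"}
-- MONEY_CHARS = {"k", "s", "a"}
--
-- def value_category(inp: str) -> str:
--     """Gets the type of unit used: weight or money."""
--     if not inp:
--         return ""
--     c = inp[-1]
--     if c in WEIGHT_CHARS:
--         return "weight"
--     if c in MONEY_CHARS:
--         return "money"
--     return ""
-- ===== Notes on version B (the rewrite author's own statement) =====
-- stated objective: simpler
-- what changed: Replaces the two endswith-scanning loops over the unit dictionaries by a single last-character lookup in two disjoint character sets (every suffix in A is determined by its last character), with an explicit empty-string guard.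
import Mathlib
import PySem

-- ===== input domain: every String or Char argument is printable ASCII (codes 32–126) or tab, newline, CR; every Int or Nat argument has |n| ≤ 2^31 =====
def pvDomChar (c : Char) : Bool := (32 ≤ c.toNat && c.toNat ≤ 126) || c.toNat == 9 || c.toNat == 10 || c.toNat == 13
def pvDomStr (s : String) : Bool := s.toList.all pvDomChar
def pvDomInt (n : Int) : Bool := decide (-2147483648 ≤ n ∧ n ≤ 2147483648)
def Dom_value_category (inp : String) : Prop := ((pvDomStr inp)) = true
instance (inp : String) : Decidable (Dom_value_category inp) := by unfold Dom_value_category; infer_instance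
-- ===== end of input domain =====

-- B replaces A's two endswith loops over the unit dictionaries by a single
-- last-character lookup in two disjoint character sets (objective: simpler).


-- ===== PORT A =====
-- for end in WEIGHTS.keys(): if inp.endswith(end): return "weight"; then CURRENCIES; else ""
def value_category (inp : String) : String :=
  if PySem.Str.endswith inp "g" then "weight"
  else if PySem.Str.endswith inp "kg" then "weight"
  else if PySem.Str.endswith inp "t" then "weight"
  else if PySem.Str.endswith inp "k" then "money"
  else if PySem.Str.endswith inp "s" then "money"
  else if PySem.Str.endswith inp "a" then "money"
  else ""

-- ===== PORT B =====
-- guard empty string, then classify inp[-1] by membership in the two character sets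
def value_category_alt (inp : String) : String :=
  match inp.toList.getLast? with
  | none => ""
  | some c =>
    if c = 'g' ∨ c = 't' then "weight"
    else if c = 'k' ∨ c = 's' ∨ c = 'a' then "money"
    else ""

-- ===== PRECONDITION & SPEC =====
def Spec_value_category (inp : String) (out : String) : Prop := out = value_category_alt inp
instance (inp : String) (out : String) : Decidable (Spec_value_category inp out) := by unfold Spec_value_category; infer_instance

-- ===== CLAIM (what is proved, stated in full; the proofs are below) =====
def Claim_equal_value_category : Prop := ∀ (inp : String), Dom_value_category inp → Spec_value_category inp (value_category inp)

-- ===== LEMMAS AND PROOFS =====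

-- endswith with a one-character pattern tests the last character
theorem endswith_singleton (cs : List Char) (x : Char) :
    PySem.Chars.endswith cs [x] = true ↔ cs.getLast? = some x := by
  rw [PySem.Chars.endswith_iff]
  rcases List.eq_nil_or_concat cs with rfl | ⟨ds, c, rfl⟩
  · simp
  · constructor
    · rintro ⟨t, ht⟩
      have ht' : t.concat x = ds.concat c := by simpa [List.concat] using ht
      have := List.concat_inj.mp ht'
      simp [this.2]
    · intro h
      simp at h
      exact ⟨ds, by simp [h]⟩

-- if the string does not end in 'g', it does not end in "kg" either
theorem endswith_kg (cs : List Char) (h : cs.getLast? ≠ some 'g') :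
    PySem.Chars.endswith cs ['k', 'g'] = false := by
  rw [Bool.eq_false_iff]
  intro hkg
  apply h
  have hsuf : ['k', 'g'] <:+ cs := (PySem.Chars.endswith_iff cs _).mp hkg
  have : ['g'] <:+ cs := List.IsSuffix.trans ⟨['k'], rfl⟩ hsuf
  exact (endswith_singleton cs 'g').mp ((PySem.Chars.endswith_iff cs _).mpr this)

-- ===== VERDICT (by name: the statement is the Claim_ definition above) =====

theorem value_category_spec : Claim_equal_value_category := by
  intro inp _
  unfold Spec_value_category value_category value_category_alt
  simp only [PySem.Str.endswith_eq]
  cases h : inp.toList.getLast? with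
  | none =>
    have : inp.toList = [] := List.getLast?_eq_none_iff.mp h
    simp [this, PySem.Chars.endswith]
  | some c =>
    by_cases hg : c = 'g'
    · simp [(endswith_singleton _ _).mpr (hg ▸ h), hg]
    · have h1 : PySem.Chars.endswith inp.toList ['g'] = false := by
        rw [Bool.eq_false_iff]
        intro hc; exact hg (by have := (endswith_singleton _ _).mp hc; rw [h] at this; injection this)
      have h2 := endswith_kg inp.toList (by rw [h]; intro hc; exact hg (by injection hc))
      have hs : ∀ x : Char, PySem.Chars.endswith inp.toList [x] = true ↔ c = x := by
        intro x
        rw [endswith_singleton, h]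
        constructor
        · intro hc; injection hc
        · intro hc; rw [hc]
      have e : ∀ x : Char, PySem.Chars.endswith inp.toList [x] = decide (c = x) := by
        intro x
        by_cases hc : c = x
        · simp [hc, (hs x).mpr hc]
        · simp [hc]
          rw [Bool.eq_false_iff]; intro hb; exact hc ((hs x).mp hb)
      have sg : ("g" : String).toList = ['g'] := rfl
      have skg : ("kg" : String).toList = ['k', 'g'] := rfl
      have st : ("t" : String).toList = ['t'] := rfl
      have sk : ("k" : String).toList = ['k'] := rfl
      have ss : ("s" : String).toList = ['s'] := rfl
      have sa : ("a" : String).toList = ['a'] := rfl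
      simp only [sg, skg, st, sk, ss, sa, e, h2]
      by_cases ht : c = 't' <;> by_cases hk : c = 'k' <;> by_cases hsx : c = 's' <;>
        by_cases ha : c = 'a' <;> simp_all
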